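-- pv_equiv track=rewrite | github.com/uvsq22105352/l1-python | exercises/TD04_listes/carre_magique.py | estNormalv2
-- ===== SOURCE A (Python) =====
-- def estNormalv2(carre: list) -> bool:
--     """ Retourne True si contient toutes les valeurs de 1 à n^2 où n est la taille
--         du carré, et False sinon """
--     taille = len(carre)
--     for entier in range(1, taille*taille + 1):
--         est_present = False
--         for ligne in carre:
--             if entier in ligne:
--                 est_present = True
--                 break
--         if not est_present:
--             return False
--     return True
-- ===== SOURCE B (Python) =====
-- def estNormalv2(carre: list) -> bool:
--     n = len(carre)
--     present = [False] * (n * n)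
--     for ligne in carre:
--         for v in ligne:
--             if 1 <= v <= n * n:
--                 present[v - 1] = True
--     return all(present)
-- ===== Notes on version B (the rewrite author's own statement) =====
-- stated objective: faster
-- what changed: Replaces the per-target repeated scan of the whole square (for each value 1..n^2, scan every row) by a single pass that marks a value-indexed boolean table, followed by an all() over the table.
import Mathlib
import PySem

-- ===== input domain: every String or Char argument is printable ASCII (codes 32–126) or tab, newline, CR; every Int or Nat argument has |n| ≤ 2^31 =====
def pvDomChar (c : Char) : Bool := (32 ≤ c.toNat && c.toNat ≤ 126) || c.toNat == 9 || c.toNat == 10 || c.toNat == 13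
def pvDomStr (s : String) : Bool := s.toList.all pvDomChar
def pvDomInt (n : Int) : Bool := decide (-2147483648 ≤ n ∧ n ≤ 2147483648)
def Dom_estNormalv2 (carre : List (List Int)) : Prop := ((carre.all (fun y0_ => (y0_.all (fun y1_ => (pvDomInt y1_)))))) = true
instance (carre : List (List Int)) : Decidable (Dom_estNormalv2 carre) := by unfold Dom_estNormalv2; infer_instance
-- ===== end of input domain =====

-- B replaces A's per-target repeated scanning of the square by a one-pass value-indexed
-- boolean table followed by an all-check (asymptotically fewer cell visits).


-- ===== PORT A =====
-- inner loop: 'for ligne in carre: if entier in ligne: est_present = True; break'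
def estNormalv2_inner (entier : Int) : List (List Int) → Bool
  | [] => false
  | ligne :: rest => if ligne.contains entier then true else estNormalv2_inner entier rest

-- outer loop over range(1, taille*taille + 1), with the early 'return False'
def estNormalv2_loop (carre : List (List Int)) : List Int → Bool
  | [] => true
  | entier :: rest =>
      if !(estNormalv2_inner entier carre) then false else estNormalv2_loop carre rest

def estNormalv2 (carre : List (List Int)) : Bool :=
  let taille : Int := (carre.length : Int)
  estNormalv2_loop carre (PySem.List.pyRange 1 (taille * taille + 1) 1)

-- ===== PORT B =====
-- 'for v in ligne: if 1 <= v <= n*n: present[v-1] = True'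
def markRow (nn : Nat) (present : List Bool) (ligne : List Int) : List Bool :=
  ligne.foldl (fun p v => if 1 ≤ v ∧ v ≤ (nn : Int) then p.set (v - 1).toNat true else p) present

def estNormalv2_alt (carre : List (List Int)) : Bool :=
  let n := carre.length
  let present := carre.foldl (markRow (n * n)) (List.replicate (n * n) false)
  present.all id

-- ===== PRECONDITION & SPEC =====
def Spec_estNormalv2 (carre : List (List Int)) (out : Bool) : Prop := out = estNormalv2_alt carre
instance (carre : List (List Int)) (out : Bool) : Decidable (Spec_estNormalv2 carre out) := by unfold Spec_estNormalv2; infer_instance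

-- ===== CLAIM (what is proved, stated in full; the proofs are below) =====
def Claim_equal_estNormalv2 : Prop := ∀ (carre : List (List Int)), Dom_estNormalv2 carre → Spec_estNormalv2 carre (estNormalv2 carre)

-- ===== LEMMAS AND PROOFS =====

theorem inner_eq_any (entier : Int) (carre : List (List Int)) :
    estNormalv2_inner entier carre = carre.any (fun ligne => ligne.contains entier) := by
  induction carre with
  | nil => rfl
  | cons l rest ih =>
      simp [estNormalv2_inner, List.any_cons, ih]

theorem loop_eq_all (carre : List (List Int)) (l : List Int) :
    estNormalv2_loop carre l = l.all (fun e => estNormalv2_inner e carre) := by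
  induction l with
  | nil => rfl
  | cons e rest ih =>
      simp only [estNormalv2_loop, List.all_cons, ih]
      by_cases h : estNormalv2_inner e carre = true <;> simp [h]

theorem markRow_length (nn : Nat) (ligne : List Int) (p : List Bool) :
    (markRow nn p ligne).length = p.length := by
  induction ligne generalizing p with
  | nil => rfl
  | cons v rest ih =>
      simp only [markRow, List.foldl_cons] at ih ⊢
      rw [ih]
      split <;> simp

theorem markRow_getElem (nn : Nat) (ligne : List Int) (p : List Bool) (i : Nat)
    (hi : i < p.length) :
    (markRow nn p ligne)[i]'(by rw [markRow_length]; exact hi) =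
      (p[i] || ligne.any (fun v =>
        decide (1 ≤ v ∧ v ≤ (nn : Int)) && ((v - 1).toNat == i))) := by
  induction ligne generalizing p with
  | nil => simp [markRow]
  | cons v rest ih =>
      by_cases h : 1 ≤ v ∧ v ≤ (nn : Int)
      · simp only [markRow, List.foldl_cons, if_pos h] at ih ⊢
        rw [ih (p.set (v - 1).toNat true) (by simpa using hi)]
        simp only [List.any_cons, h]
        rw [List.getElem_set]
        by_cases hji : (v - 1).toNat = i
        · simp [hji]
        · have hji' : ¬(v.toNat - 1 = i) := by have := h.1; omega
          simp [hji', beq_eq_false_iff_ne.mpr hji']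
      · simp only [markRow, List.foldl_cons, if_neg h] at ih ⊢
        rw [ih p hi, List.any_cons,
          show (decide (1 ≤ v ∧ v ≤ (nn : Int)) && ((v - 1).toNat == i)) = false by
            rw [decide_eq_false h]; rfl]
        simp

theorem build_length (nn : Nat) (carre : List (List Int)) (p : List Bool) :
    (carre.foldl (markRow nn) p).length = p.length := by
  induction carre generalizing p with
  | nil => rfl
  | cons l rest ih => simp only [List.foldl_cons]; rw [ih, markRow_length]

theorem build_getElem (nn : Nat) (carre : List (List Int)) (p : List Bool) (i : Nat)
    (hi : i < p.length) :
    (carre.foldl (markRow nn) p)[i]'(by rw [build_length]; exact hi) =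
      (p[i] || carre.any (fun ligne => ligne.any (fun v =>
        decide (1 ≤ v ∧ v ≤ (nn : Int)) && ((v - 1).toNat == i)))) := by
  induction carre generalizing p with
  | nil => simp
  | cons l rest ih =>
      simp only [List.foldl_cons, List.any_cons]
      rw [ih (markRow nn p l) ((markRow_length nn l p).symm ▸ hi),
        markRow_getElem nn l p i hi, Bool.or_assoc]

theorem all_id_iff (l : List Bool) :
    l.all id = true ↔ ∀ i (h : i < l.length), l[i] = true := by
  simp only [List.all_eq_true, id]
  constructor
  · intro h i hi; exact h _ (l.getElem_mem hi)
  · intro h x hx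
    obtain ⟨i, hi, rfl⟩ := List.mem_iff_getElem.mp hx
    exact h i hi

-- both programs are True exactly when every value 1..n² occurs in some row
theorem a_iff (carre : List (List Int)) :
    estNormalv2 carre = true ↔
      ∀ i : Nat, i < carre.length * carre.length →
        ∃ ligne ∈ carre, ((i : Int) + 1) ∈ ligne := by
  unfold estNormalv2
  rw [loop_eq_all]
  simp only [List.all_eq_true, PySem.List.mem_pyRange_one]
  constructor
  · intro h i hi
    have := h ((i : Int) + 1) ⟨by omega, by omega⟩
    rw [inner_eq_any] at this
    simp only [List.any_eq_true, List.contains_iff_mem] at this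
    exact this
  · intro h v ⟨h1, h2⟩
    rw [inner_eq_any]
    simp only [List.any_eq_true, List.contains_iff_mem]
    have hi : (v - 1).toNat < carre.length * carre.length := by
      have : v < (carre.length : Int) * carre.length + 1 := h2
      push_cast at this ⊢
      omega
    obtain ⟨ligne, hl, hm⟩ := h _ hi
    have : ((v - 1).toNat : Int) + 1 = v := by omega
    rw [this] at hm
    exact ⟨ligne, hl, hm⟩

theorem b_iff (carre : List (List Int)) :
    estNormalv2_alt carre = true ↔
      ∀ i : Nat, i < carre.length * carre.length →
        ∃ ligne ∈ carre, ((i : Int) + 1) ∈ ligne := by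
  unfold estNormalv2_alt
  rw [all_id_iff]
  have hlen : (carre.foldl (markRow (carre.length * carre.length))
      (List.replicate (carre.length * carre.length) false)).length =
      carre.length * carre.length := by
    rw [build_length, List.length_replicate]
  constructor
  · intro h i hi
    have := h i (by rw [hlen]; exact hi)
    rw [build_getElem _ _ _ i (by simpa using hi)] at this
    simp only [List.getElem_replicate, Bool.false_or, List.any_eq_true,
      decide_eq_true_eq, Bool.and_eq_true, beq_iff_eq] at this
    obtain ⟨ligne, hl, v, hv, ⟨hv1, hv2⟩, hvi⟩ := this
    have : (i : Int) + 1 = v := by omega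
    exact ⟨ligne, hl, this ▸ hv⟩
  · intro h i hi
    rw [hlen] at hi
    rw [build_getElem _ _ _ i (by simpa using hi)]
    simp only [List.getElem_replicate, Bool.false_or, List.any_eq_true,
      decide_eq_true_eq, Bool.and_eq_true, beq_iff_eq]
    obtain ⟨ligne, hl, hm⟩ := h i hi
    refine ⟨ligne, hl, (i : Int) + 1, hm, ⟨by omega, ?_⟩, by omega⟩
    have : (i : Int) < (carre.length : Int) * carre.length := by omega
    omega

-- ===== VERDICT (by name: the statement is the Claim_ definition above) =====
theorem estNormalv2_spec : Claim_equal_estNormalv2 := by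
  intro carre _
  unfold Spec_estNormalv2
  rw [Bool.eq_iff_iff, a_iff, b_iff]
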